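-- pv_equiv track=rewrite | github.com/minsung37/Algorithm | etc/programmers/L2/L2_괄호 변환.py | solution
-- ===== SOURCE A (Python) =====
-- def solution(p):
--     result = ""
--     if p == "":
--         return result
--
--     def trans(p):
--         u, v, count = "", "", 0
--         for index, p_ in enumerate(p):
--             if p_ == "(":
--                 count = count + 1
--             else:
--                 count = count - 1
--             u = u + p_
--             if count == 0:
--                 v = p[index + 1:]
--                 break
--         return u, v
--
--     def check(u):
--         stack = []
--         for i in u:
--             if not stack:
--                 if i == ")":
--                     return False
--                 stack.append(i)
--             else:
--                 if i == ")" and stack[-1] == "(":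
--                     stack.pop()
--                 else:
--                     stack.append(i)
--         if not stack:
--             return True
--         else:
--             return False
--
--     def sol(p):
--         result = ""
--         if p == result:             # 1. 입력이 빈 문자열인 경우, 빈 문자열을 반환합니다.
--             return result
--         u, v = trans(p)             # 2. 문자열 w를 두 "균형잡힌 괄호 문자열" u, v로 분리합니다. 단, u는 "균형잡힌 괄호 문자열"로 더 이상 분리할 수 없어야 하며, v는 빈 문자열이 될 수 있습니다.
--         if check(u):                # 3. 문자열 u가 "올바른 괄호 문자열" 이라면 문자열 v에 대해 1단계부터 다시 수행합니다.
--             result = u + sol(v)         # 3-1. 수행한 결과 문자열을 u에 이어 붙인 후 반환합니다.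
--         else:                       # 4. 문자열 u가 "올바른 괄호 문자열"이 아니라면 아래 과정을 수행합니다.
--             temp = "("                  # 4-1. 빈 문자열에 첫 번째 문자로 '('를 붙입니다.
--             temp = temp + sol(v)        # 4-2. 문자열 v에 대해 1단계부터 재귀적으로 수행한 결과 문자열을 이어 붙입니다.
--             temp = temp + ")"           # 4-3. ')'를 다시 붙입니다.
--             u = u[1:-1]                 # 4-4. u의 첫 번째와 마지막 문자를 제거하고, 나머지 문자열의 괄호 방향을 뒤집어서 뒤에 붙입니다.
--             for c in u:
--                 if c == '(':
--                     temp = temp + ')'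
--                 else:
--                     temp = temp + '('
--             result = result + temp      # 4-5. 생성된 문자열을 반환합니다.
--         return result
--
--     result = sol(p)
--     return result
-- ===== SOURCE B (Python) =====
-- def _valid(u):
--     cnt = 0
--     for c in u:
--         if c == '(':
--             cnt += 1
--         elif c == ')':
--             if cnt == 0:
--                 return False
--             cnt -= 1
--         else:
--             return False
--     return cnt == 0
--
--
-- def solution(p):
--     n = len(p)
--     out = []    # front pieces, in order
--     tail = []   # back pieces, to be emitted in reverse order
--     i = 0
--     while i < n:
--         # find end of the first balanced-count segment starting at i
--         cnt = 0
--         j = i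
--         while j < n:
--             cnt += 1 if p[j] == '(' else -1
--             j += 1
--             if cnt == 0:
--                 break
--         seg = p[i:j]
--         if _valid(seg):
--             out.append(seg)
--         else:
--             out.append('(')
--             tail.append(')' + ''.join(')' if c == '(' else '(' for c in seg[1:-1]))
--         i = j
--     return ''.join(out) + ''.join(reversed(tail))
-- ===== Notes on version B (the rewrite author's own statement) =====
-- stated objective: alternative
-- what changed: Replaces the recursive string-concatenating decomposition (char-by-char u=u+c building, stack-based validity check, recursion rebuilding strings) with a single iterative index pass over top-level segments that slices each segment once, checks validity with a counter instead of a stack, and accumulates output pieces in lists joined once at the end (intended as faster; measured 1.44x at the largest size, below the 1.5x confirmation bar).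
import Mathlib
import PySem

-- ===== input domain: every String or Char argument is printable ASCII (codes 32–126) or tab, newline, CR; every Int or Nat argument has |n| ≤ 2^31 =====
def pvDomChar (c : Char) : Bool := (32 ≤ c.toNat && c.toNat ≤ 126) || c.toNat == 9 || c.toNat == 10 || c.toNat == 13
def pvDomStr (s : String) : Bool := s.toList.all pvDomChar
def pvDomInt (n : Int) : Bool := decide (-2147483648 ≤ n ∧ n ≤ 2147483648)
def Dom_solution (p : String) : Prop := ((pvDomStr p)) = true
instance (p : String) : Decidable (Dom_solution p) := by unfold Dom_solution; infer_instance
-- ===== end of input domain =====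

-- B replaces A's recursive string-rebuilding decomposition by one iterative pass over top-level segments with list accumulation and a counter-based validity check (objective: alternative).

-- ===== PORT A =====

-- trans: scan while building u char by char; break when count hits 0, v = remainder
def transGoA (rest : List Char) (u : List Char) (count : Int) : List Char × List Char :=
  match rest with
  | [] => (u, [])
  | c :: rs =>
    let count' := if c = '(' then count + 1 else count - 1
    let u' := u ++ [c]
    if count' = 0 then (u', rs) else transGoA rs u' count'

def transA (p : List Char) : List Char × List Char := transGoA p [] 0

-- check: explicit stack (top = head)
def checkGoA (u : List Char) (stack : List Char) : Bool :=
  match u with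
  | [] => stack.isEmpty
  | i :: rest =>
    match stack with
    | [] => if i = ')' then false else checkGoA rest [i]
    | t :: ts => if i = ')' ∧ t = '(' then checkGoA rest ts else checkGoA rest (i :: t :: ts)

def checkA (u : List Char) : Bool := checkGoA u []

theorem transGoA_snd_le (rest : List Char) : ∀ (u : List Char) (c : Int),
    (transGoA rest u c).2.length ≤ rest.length := by
  induction rest with
  | nil => intro u c; simp [transGoA]
  | cons x xs ih =>
    intro u c
    simp only [transGoA]
    split <;> split
    · simp
    · exact le_trans (ih _ _) (Nat.le_succ _)
    · simp
    · exact le_trans (ih _ _) (Nat.le_succ _)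

theorem transGoA_snd_lt (rest : List Char) (u : List Char) (c : Int) (h : rest ≠ []) :
    (transGoA rest u c).2.length < rest.length := by
  cases rest with
  | nil => exact absurd rfl h
  | cons x xs =>
    simp only [transGoA]
    split <;> split
    · simp
    · exact lt_of_le_of_lt (transGoA_snd_le xs _ _) (Nat.lt_succ_self _)
    · simp
    · exact lt_of_le_of_lt (transGoA_snd_le xs _ _) (Nat.lt_succ_self _)

def solA (p : List Char) : List Char :=
  match p with
  | [] => []
  | c :: rest =>
    let uv := transA (c :: rest)
    let u := uv.1
    let v := uv.2
    if checkA u then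
      u ++ solA v
    else
      -- temp = "(" + sol(v) + ")" ; then append the flip of each char of u[1:-1]
      let temp := '(' :: (solA v ++ [')'])
      let mid := PySem.List.slice u (some 1) (some (-1))
      mid.foldl (fun acc ch => acc ++ [if ch = '(' then ')' else '(']) temp
termination_by p.length
decreasing_by
  all_goals
    simp only [transA]
    exact transGoA_snd_lt (c :: rest) [] 0 (by simp)

def solution (p : String) : String :=
  if p = "" then "" else String.mk (solA p.toList)

-- ===== PORT B =====

-- counter-based validity check with early exit
def validB (u : List Char) (cnt : Int) : Bool :=
  match u with
  | [] => cnt == 0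
  | c :: cs =>
    if c = '(' then validB cs (cnt + 1)
    else if c = ')' then (if cnt = 0 then false else validB cs (cnt - 1))
    else false

-- length of the first balanced-count segment (B's inner index loop)
def scanLenB (rest : List Char) (cnt : Int) (j : Nat) : Nat :=
  match rest with
  | [] => j
  | c :: cs =>
    let cnt' := cnt + (if c = '(' then 1 else -1)
    if cnt' = 0 then j + 1 else scanLenB cs cnt' (j + 1)

theorem scanLenB_ge (rest : List Char) : ∀ (cnt : Int) (j : Nat), j ≤ scanLenB rest cnt j := by
  induction rest with
  | nil => intro cnt j; simp [scanLenB]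
  | cons x xs ih =>
    intro cnt j
    simp only [scanLenB]
    split <;> split
    · omega
    · exact le_trans (Nat.le_succ _) (ih _ (j + 1))
    · omega
    · exact le_trans (Nat.le_succ _) (ih _ (j + 1))

theorem scanLenB_pos (c : Char) (cs : List Char) (cnt : Int) (j : Nat) :
    j + 1 ≤ scanLenB (c :: cs) cnt j := by
  simp only [scanLenB]
  split <;> split
  · omega
  · exact scanLenB_ge cs _ (j + 1)
  · omega
  · exact scanLenB_ge cs _ (j + 1)

def loopB (rest : List Char) (out : List (List Char)) (tail : List (List Char)) : String :=
  match rest with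
  | [] => String.mk (out.flatten ++ tail.reverse.flatten)
  | c :: cs =>
    let L := scanLenB (c :: cs) 0 0
    let seg := (c :: cs).take L
    let rest' := (c :: cs).drop L
    if validB seg 0 then
      loopB rest' (out ++ [seg]) tail
    else
      loopB rest' (out ++ [['(']])
        (tail ++ [')' :: ((seg.drop 1).dropLast.map (fun ch => if ch = '(' then ')' else '('))])
termination_by rest.length
decreasing_by
  all_goals
    have h1 : 1 ≤ scanLenB (c :: cs) 0 0 := scanLenB_pos c cs 0 0
    simp only [List.length_drop, List.length_cons]
    omega

def solution_alt (p : String) : String := loopB p.toList [] []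

-- ===== PRECONDITION & SPEC =====
def Spec_solution (p : String) (out : String) : Prop := out = solution_alt p
instance (p : String) (out : String) : Decidable (Spec_solution p out) := by unfold Spec_solution; infer_instance

-- ===== CLAIM (what is proved, stated in full; the proofs are below) =====
def Claim_equal_solution : Prop := ∀ (p : String), Dom_solution p → Spec_solution p (solution p)

-- ===== LEMMAS AND PROOFS =====

theorem scanLenB_shift (rest : List Char) : ∀ (cnt : Int) (j : Nat),
    scanLenB rest cnt j = j + scanLenB rest cnt 0 := by
  induction rest with
  | nil => intro cnt j; simp [scanLenB]
  | cons x xs ih =>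
    intro cnt j
    simp only [scanLenB]
    split <;> split
    · omega
    · rw [ih _ (j + 1), ih _ (0 + 1)]; omega
    · omega
    · rw [ih _ (j + 1), ih _ (0 + 1)]; omega

-- trans's result is exactly take/drop at B's scanned segment length
theorem transGoA_take_drop (rest : List Char) : ∀ (u : List Char) (c : Int),
    transGoA rest u c =
      (u ++ rest.take (scanLenB rest c 0), rest.drop (scanLenB rest c 0)) := by
  induction rest with
  | nil => intro u c; simp [transGoA, scanLenB]
  | cons x xs ih =>
    intro u c
    by_cases hx : x = '('
    · by_cases h0 : c + 1 = 0
      · simp [transGoA, scanLenB, hx, h0]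
      · simp only [transGoA, scanLenB, hx, if_neg h0, if_true]
        rw [ih (u ++ ['(']) (c + 1), scanLenB_shift xs (c + 1) (0 + 1)]
        simp [List.take_succ_cons, List.drop_succ_cons, Nat.add_comm]
    · by_cases h0 : c - 1 = 0
      · simp [transGoA, scanLenB, hx, h0, show c + -1 = 0 by omega]
      · simp only [transGoA, scanLenB, hx, if_false,
          if_neg (show ¬(c + -1 = 0) by omega), if_neg h0]
        rw [ih (u ++ [x]) (c - 1), scanLenB_shift xs (c + -1) (0 + 1)]
        simp only [show c - 1 = c + -1 by omega]
        simp [List.take_succ_cons, List.drop_succ_cons, Nat.add_comm]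

-- once a non-'(' character is on the stack, A's check returns false
theorem checkGoA_bad (u : List Char) : ∀ (stack : List Char),
    (∃ x ∈ stack, x ≠ '(') → checkGoA u stack = false := by
  induction u with
  | nil =>
    intro stack ⟨x, hx, _⟩
    cases stack with
    | nil => cases hx
    | cons t ts => simp [checkGoA]
  | cons i rest ih =>
    intro stack ⟨x, hx, hxne⟩
    cases stack with
    | nil => cases hx
    | cons t ts =>
      simp only [checkGoA]
      split
      · rename_i hcond
        apply ih
        refine ⟨x, ?_, hxne⟩
        rcases List.mem_cons.mp hx with h | h
        · exact absurd (h ▸ hcond.2) hxne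
        · exact h
      · exact ih _ ⟨x, List.mem_cons_of_mem _ hx, hxne⟩

-- A's stack check on a pure-'(' stack equals B's counter check
theorem checkGoA_eq_validB (u : List Char) : ∀ (k : Nat),
    checkGoA u (List.replicate k '(') = validB u (k : Int) := by
  induction u with
  | nil =>
    intro k
    cases k with
    | zero => simp [checkGoA, validB]
    | succ s =>
      simp [checkGoA, validB, List.replicate]
      omega
  | cons c cs ih =>
    intro k
    cases k with
    | zero =>
      simp only [List.replicate, Nat.cast_zero]
      by_cases hc : c = '('
      · have : checkGoA (c :: cs) [] = checkGoA cs (List.replicate 1 '(') := by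
          simp [checkGoA, hc, List.replicate]
        rw [this, ih 1]
        simp [validB, hc]
      · by_cases hc2 : c = ')'
        · simp [checkGoA, validB, hc2]
        · have : checkGoA (c :: cs) [] = checkGoA cs [c] := by
            simp [checkGoA, hc2]
          rw [this, checkGoA_bad cs [c] ⟨c, List.mem_singleton_self c, hc⟩]
          simp [validB, hc, hc2]
    | succ s =>
      have hrep : List.replicate (s + 1) '(' = '(' :: List.replicate s '(' := rfl
      by_cases hc : c = '('
      · have : checkGoA (c :: cs) (List.replicate (s + 1) '(')
            = checkGoA cs (List.replicate (s + 2) '(') := by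
          rw [hrep]
          simp [checkGoA, hc, List.replicate]
        rw [this, ih (s + 2)]
        simp [validB, hc]
        ring_nf
      · by_cases hc2 : c = ')'
        · have : checkGoA (c :: cs) (List.replicate (s + 1) '(')
              = checkGoA cs (List.replicate s '(') := by
            rw [hrep]; simp [checkGoA, hc2]
          rw [this, ih s]
          have h1 : ¬(((s + 1 : Nat) : Int) = 0) := by push_cast; omega
          simp [validB, hc2]
          intro _
          omega
        · have : checkGoA (c :: cs) (List.replicate (s + 1) '(')
              = checkGoA cs (c :: '(' :: List.replicate s '(') := by
            rw [hrep]; simp [checkGoA, hc2]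
          rw [this, checkGoA_bad cs _ ⟨c, List.mem_cons_self, hc⟩]
          simp [validB, hc, hc2]

theorem slice_one_neg_one (xs : List Char) :
    PySem.List.slice xs (some 1) (some (-1)) = (xs.drop 1).dropLast := by
  cases xs with
  | nil => simp [PySem.List.slice]
  | cons a t => simp [PySem.List.slice, List.dropLast_eq_take]

theorem foldl_append_map (f : Char → Char) (l : List Char) : ∀ (init : List Char),
    l.foldl (fun acc ch => acc ++ [f ch]) init = init ++ l.map f := by
  induction l with
  | nil => intro init; simp
  | cons x xs ih => intro init; simp [ih]

-- main loop invariant: loopB emits out, then A's recursion result, then the stacked tails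
theorem loopB_eq (n : Nat) : ∀ (rest : List Char), rest.length = n →
    ∀ (out tail : List (List Char)),
      loopB rest out tail = String.mk (out.flatten ++ solA rest ++ tail.reverse.flatten) := by
  induction n using Nat.strong_induction_on with
  | _ n ih =>
    intro rest hlen out tail
    cases rest with
    | nil => simp [loopB, solA]
    | cons c cs =>
      have htd := transGoA_take_drop (c :: cs) [] 0
      have hL1 : 1 ≤ scanLenB (c :: cs) 0 0 := scanLenB_pos c cs 0 0
      have hlt : ((c :: cs).drop (scanLenB (c :: cs) 0 0)).length < n := by
        simp only [List.length_drop]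
        simp only [← hlen, List.length_cons]
        omega
      have hcheck : checkA ((c :: cs).take (scanLenB (c :: cs) 0 0))
          = validB ((c :: cs).take (scanLenB (c :: cs) 0 0)) 0 := by
        have := checkGoA_eq_validB ((c :: cs).take (scanLenB (c :: cs) 0 0)) 0
        simpa [checkA, List.replicate] using this
      rw [loopB, solA]
      simp only [transA] at *
      rw [htd]
      simp only [List.nil_append]
      rw [hcheck]
      split
      · rw [ih _ hlt _ rfl]
        simp [List.append_assoc]
      · rw [ih _ hlt _ rfl]
        rw [slice_one_neg_one, foldl_append_map]
        simp [List.append_assoc]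

-- ===== VERDICT (by name: the statement is the Claim_ definition above) =====
theorem solution_spec : Claim_equal_solution := by
  intro p _
  unfold Spec_solution solution solution_alt
  rw [loopB_eq p.toList.length p.toList rfl]
  by_cases h : p = ""
  · subst h
    simp [solA]
    rfl
  · simp only [if_neg h, List.flatten_nil, List.nil_append, List.reverse_nil, List.append_nil]
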